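-- pv_equiv track=rewrite | github.com/BLERBZ/robin | lib/robin_sync.py | _needs_rebrand
-- ===== SOURCE A (Python) =====
-- BRANDING_FILES = {
--     "README.md",
--     "CONTRIBUTING.md",
--     "pyproject.toml",
--     "docs/",
-- }
--
-- def _needs_rebrand(path: str) -> bool:
--     """Check if a file needs branding replacement."""
--     for branding_path in BRANDING_FILES:
--         if branding_path.endswith("/"):
--             if path.startswith(branding_path):
--                 return True
--         elif path == branding_path:
--             return True
--     return False
-- ===== SOURCE B (Python) =====
-- BRANDING_FILES = {
--     "README.md",
--     "CONTRIBUTING.md",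
--     "pyproject.toml",
--     "docs/",
-- }
--
-- def _needs_rebrand(path: str) -> bool:
--     """Check if a file needs branding replacement."""
--     # Derive a single lookup key from the path's first segment: a path inside a
--     # directory is represented by its top-level directory key "<head>/", a bare
--     # name by itself.  One membership test replaces A's scan over the patterns.
--     # Correct because every directory entry in BRANDING_FILES is a single
--     # top-level directory and every file entry is slash-free.
--     head, sep, _tail = path.partition("/")
--     key = head + "/" if sep else path
--     return key in BRANDING_FILES
-- ===== Notes on version B (the rewrite author's own statement) =====
-- stated objective: alternative
-- what changed: Instead of scanning the branding patterns and dispatching on whether each ends with a slash, B derives a single lookup key from the path itself via str.partition at the first slash (the top-level directory key if the path contains a slash, else the path) and does one set-membership test; correct because every directory entry in BRANDING_FILES is a single top-level directory and every file entry is slash-free.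
import Mathlib
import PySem

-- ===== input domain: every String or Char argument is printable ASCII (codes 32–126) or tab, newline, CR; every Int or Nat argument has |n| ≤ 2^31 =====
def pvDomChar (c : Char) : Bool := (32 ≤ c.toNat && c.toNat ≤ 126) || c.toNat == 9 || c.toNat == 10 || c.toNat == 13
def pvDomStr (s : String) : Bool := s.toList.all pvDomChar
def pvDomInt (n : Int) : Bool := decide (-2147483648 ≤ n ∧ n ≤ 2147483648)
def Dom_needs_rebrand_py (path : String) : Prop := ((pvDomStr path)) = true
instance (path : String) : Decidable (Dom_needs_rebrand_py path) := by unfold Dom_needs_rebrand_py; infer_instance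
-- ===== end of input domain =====

-- B replaces A's scan over the branding patterns by one membership test of a lookup key
-- derived from the path's first segment (str.partition) — a plainer single-lookup formulation.
-- ===== PORT A =====
-- set iteration order of BRANDING_FILES is irrelevant: the loop returns True iff any member matches
def pvBrandingFiles : List String := ["README.md", "CONTRIBUTING.md", "pyproject.toml", "docs/"]

def needs_rebrand_py_loop (path : String) : List String → Bool
  | [] => false
  | bp :: rest =>
      if PySem.Str.endswith bp "/" then
        if PySem.Str.startswith path bp then true else needs_rebrand_py_loop path rest
      else if path == bp then true
      else needs_rebrand_py_loop path rest

def needs_rebrand_py (path : String) : Bool := needs_rebrand_py_loop path pvBrandingFiles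

-- ===== PORT B =====
-- strings handled as char lists (PySem convention); 'head, sep, _tail = path.partition("/")'
-- is ported exactly by the two components B uses: head = the chars before the first '/',
-- and sep is nonempty ↔ '/' occurs in path.
def pvBrandingKeys : List (List Char) :=
  ["README.md".toList, "CONTRIBUTING.md".toList, "pyproject.toml".toList, "docs/".toList]

def needs_rebrand_py_alt (path : String) : Bool :=
  let cs := path.toList
  let head := cs.takeWhile (fun c => c != '/')
  let key := if cs.contains '/' then head ++ ['/'] else cs
  pvBrandingKeys.contains key

-- ===== PRECONDITION & SPEC =====
def Spec_needs_rebrand_py (path : String) (out : Bool) : Prop := out = needs_rebrand_py_alt path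
instance (path : String) (out : Bool) : Decidable (Spec_needs_rebrand_py path out) := by unfold Spec_needs_rebrand_py; infer_instance

-- ===== CLAIM (what is proved, stated in full; the proofs are below) =====
def Claim_equal_needs_rebrand_py : Prop := ∀ (path : String), Dom_needs_rebrand_py path → Spec_needs_rebrand_py path (needs_rebrand_py path)

-- ===== LEMMAS AND PROOFS =====
-- On a path containing '/', the chars before the first '/' are "docs" iff "docs/" is a prefix.
lemma takeWhile_docs_iff (cs : List Char) (h : '/' ∈ cs) :
    cs.takeWhile (fun c => c != '/') = ['d','o','c','s'] ↔ ['d','o','c','s','/'] <+: cs := by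
  constructor
  · intro htw
    have hsplit := List.takeWhile_append_dropWhile (p := fun c => c != '/') (l := cs)
    set rest := cs.dropWhile (fun c => c != '/') with hrest
    have hne : rest ≠ [] := by
      intro hnil
      rw [hnil, List.append_nil, htw] at hsplit
      rw [← hsplit] at h
      simp at h
    have hh : rest.head hne = '/' := by
      simpa using List.head_dropWhile_not (fun c => c != '/') (l := cs) (by rw [← hrest]; exact hne)
    have : cs = ['d','o','c','s'] ++ ('/' :: rest.tail) := by
      conv_lhs => rw [← hsplit]
      rw [htw, ← hh, List.cons_head_tail hne]
    rw [this]
    exact ⟨rest.tail, rfl⟩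
  · rintro ⟨t, ht⟩
    rw [← ht]
    simp

-- a list ending in '/' cannot equal a word whose last char is not '/'
lemma concat_slash_ne_noslash (hd : List Char) (w : List Char) (hw : w.getLast? ≠ some '/') :
    hd ++ ['/'] ≠ w := by
  intro he
  apply hw
  rw [← he]
  simp

lemma ends1 : PySem.Str.endswith "README.md" "/" = false := by decide
lemma ends2 : PySem.Str.endswith "CONTRIBUTING.md" "/" = false := by decide
lemma ends3 : PySem.Str.endswith "pyproject.toml" "/" = false := by decide
lemma ends4 : PySem.Str.endswith "docs/" "/" = true := by decide

lemma needs_rebrand_eq (path : String) : needs_rebrand_py path = needs_rebrand_py_alt path := by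
  by_cases h1 : path = "README.md"
  · subst h1; decide
  by_cases h2 : path = "CONTRIBUTING.md"
  · subst h2; decide
  by_cases h3 : path = "pyproject.toml"
  · subst h3; decide
  rw [Bool.eq_iff_iff]
  unfold needs_rebrand_py pvBrandingFiles needs_rebrand_py_alt pvBrandingKeys
  simp only [needs_rebrand_py_loop, ends1, ends2, ends3, ends4,
    Bool.false_eq_true, if_false, if_true]
  have e1 : (path == "README.md") = false := by simpa using h1
  have e2 : (path == "CONTRIBUTING.md") = false := by simpa using h2
  have e3 : (path == "pyproject.toml") = false := by simpa using h3
  simp only [e1, e2, e3, Bool.false_eq_true, if_false]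
  -- A side is now the "docs/" prefix test; B side the key membership
  simp only [PySem.Str.startswith_eq, Bool.if_false_right, Bool.decide_eq_true, Bool.and_true]
  rw [PySem.Chars.startswith_iff]
  by_cases hsl : ('/' : Char) ∈ path.toList
  · have hc : path.toList.contains '/' = true := by simpa using hsl
    simp only [hc, if_true, List.contains_cons, List.contains_nil]
    rw [show ("docs/".toList) = ['d','o','c','s','/'] from rfl, ← takeWhile_docs_iff _ hsl]
    constructor
    · intro htw
      simp [htw]
    · intro hb
      simp only [Bool.or_eq_true, beq_iff_eq, Bool.or_false] at hb
      rcases hb with h | h | h | h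
      · exact absurd h (concat_slash_ne_noslash _ _ (by decide))
      · exact absurd h (concat_slash_ne_noslash _ _ (by decide))
      · exact absurd h (concat_slash_ne_noslash _ _ (by decide))
      · have : path.toList.takeWhile (fun c => c != '/') ++ ['/'] = ['d','o','c','s'] ++ ['/'] := by
          simpa using h
        exact (List.append_left_inj ['/']).mp this
  · have hc : path.toList.contains '/' = false := by simpa using hsl
    simp only [hc, Bool.false_eq_true, if_false, List.contains_cons, List.contains_nil]
    constructor
    · intro hpre
      exact absurd (hpre.mem (by decide)) hsl
    · intro hb
      simp only [Bool.or_eq_true, beq_iff_eq, Bool.or_false] at hb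
      rcases hb with h | h | h | h
      · exact absurd (String.ext_iff.mpr h) h1
      · exact absurd (String.ext_iff.mpr h) h2
      · exact absurd (String.ext_iff.mpr h) h3
      · rw [h] at hsl; exact absurd (by decide) hsl

-- ===== VERDICT (by name: the statement is the Claim_ definition above) =====
theorem needs_rebrand_py_spec : Claim_equal_needs_rebrand_py := by
  intro path _
  unfold Spec_needs_rebrand_py
  exact needs_rebrand_eq path
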